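-- pv_equiv track=rewrite | github.com/Denpeer/TweetMatch | synonyms.py | generate_new_queries
-- ===== SOURCE A (Python) =====
-- import itertools
--
-- def generate_new_queries(wordlist, kwPos, swSentence):
--     prod = list(itertools.product(*wordlist))
--     results = []
--     for comb in prod:
--         i = 0
--         temp_res = swSentence
--         for w in comb:
--             temp_res[kwPos[i]] = w
--             i = i + 1
--         temp_res = ' '.join(temp_res)
--         results.append(temp_res)
--     return results
-- ===== SOURCE B (Python) =====
-- def generate_new_queries(wordlist, kwPos, swSentence):
--     # recursive depth-first descent over positions; empty product short-circuit
--     if any(not words for words in wordlist):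
--         return []
--     results = []
--
--     def rec(rest, d):
--         if not rest:
--             results.append(' '.join(swSentence))
--         else:
--             for w in rest[0]:
--                 swSentence[kwPos[d]] = w
--                 rec(rest[1:], d + 1)
--
--     rec(wordlist, 0)
--     return results
-- ===== Notes on version B (the rewrite author's own statement) =====
-- stated objective: alternative
-- what changed: Replaces the materialized itertools.product list and the indexed fill loop with a recursive depth-first descent over the remaining word lists that writes each keyword slot and emits the joined sentence at the leaves, plus an upfront empty-wordlist short-circuit.
import Mathlib
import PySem

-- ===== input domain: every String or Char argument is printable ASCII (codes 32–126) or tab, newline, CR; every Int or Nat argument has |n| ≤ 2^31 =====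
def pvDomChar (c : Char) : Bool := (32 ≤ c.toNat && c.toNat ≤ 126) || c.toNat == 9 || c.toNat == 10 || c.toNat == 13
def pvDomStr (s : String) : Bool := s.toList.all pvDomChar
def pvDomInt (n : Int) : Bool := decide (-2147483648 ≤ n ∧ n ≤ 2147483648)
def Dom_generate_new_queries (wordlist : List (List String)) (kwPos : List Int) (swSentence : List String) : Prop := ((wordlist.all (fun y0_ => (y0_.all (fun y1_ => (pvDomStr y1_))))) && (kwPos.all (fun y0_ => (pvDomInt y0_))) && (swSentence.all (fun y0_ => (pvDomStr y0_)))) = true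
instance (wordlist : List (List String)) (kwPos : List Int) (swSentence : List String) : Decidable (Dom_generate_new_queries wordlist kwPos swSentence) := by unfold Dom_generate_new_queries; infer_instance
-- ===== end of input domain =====

-- B replaces the materialized itertools.product and the indexed fill loop by a recursive
-- depth-first descent over the remaining word lists (alternative decomposition, same cost).
-- Both Pythons mutate swSentence in place identically on all admitted inputs; the theorems
-- here are about the RETURN value.

-- ===== PORT A =====
-- itertools.product(*wordlist), in product order (first list varies slowest)
def pyProduct : List (List String) → List (List String)
  | [] => [[]]
  | l :: ls => l.flatMap (fun w => (pyProduct ls).map (fun c => w :: c))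

-- the inner 'for w in comb: temp_res[kwPos[i]] = w; i += 1' loop (total via pyGetD/pySetD;
-- Pre_ excludes the inputs where Python raises)
def fillLoop (kwPos : List Int) : List String → Nat → List String → List String
  | [], _, buf => buf
  | w :: ws, i, buf =>
      fillLoop kwPos ws (i + 1) (PySem.List.pySetD buf (PySem.List.pyGetD kwPos (i : Int) 0) w)

def generate_new_queries (wordlist : List (List String)) (kwPos : List Int) (swSentence : List String) : List String :=
  let prod := pyProduct wordlist
  (prod.foldl
    (fun (st : List String × List String) comb =>
      let buf := fillLoop kwPos comb 0 st.2
      (st.1 ++ [PySem.Str.join " " buf], buf))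
    (([] : List String), swSentence)).1

-- ===== PORT B =====
-- rec(rest, d): at [] emit the joined buffer; else for each word of the head list, write it
-- at kwPos[d] and recurse (buffer threaded functionally: the return value is unchanged)
def altRec (kwPos : List Int) : List (List String) → Nat → List String → List String
  | [], _, buf => [PySem.Str.join " " buf]
  | l :: rest, d, buf =>
      l.flatMap (fun w =>
        altRec kwPos rest (d + 1) (PySem.List.pySetD buf (PySem.List.pyGetD kwPos (d : Int) 0) w))

def generate_new_queries_alt (wordlist : List (List String)) (kwPos : List Int) (swSentence : List String) : List String :=
  if wordlist.any (fun ws => ws.isEmpty) then [] else altRec kwPos wordlist 0 swSentence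

-- ===== PRECONDITION & SPEC =====
-- Pre_: exactly where Python A returns: either the product is empty (some word list is empty,
-- nothing is indexed), or kwPos is long enough and its used entries are valid indices into swSentence.
def Pre_generate_new_queries (wordlist : List (List String)) (kwPos : List Int) (swSentence : List String) : Prop :=
  (∃ l ∈ wordlist, l = []) ∨
    (wordlist.length ≤ kwPos.length ∧
      ∀ p ∈ kwPos.take wordlist.length, -(swSentence.length : Int) ≤ p ∧ p < swSentence.length)
instance (wordlist : List (List String)) (kwPos : List Int) (swSentence : List String) : Decidable (Pre_generate_new_queries wordlist kwPos swSentence) := by unfold Pre_generate_new_queries; infer_instance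

def pvWitness_generate_new_queries : List (List String) × List Int × List String :=
  ([["hot", "cold"], ["tea"]], [0, 2], ["x", "and", "y"])

def Spec_generate_new_queries (wordlist : List (List String)) (kwPos : List Int) (swSentence : List String) (out : List String) : Prop := out = generate_new_queries_alt wordlist kwPos swSentence
instance (wordlist : List (List String)) (kwPos : List Int) (swSentence : List String) (out : List String) : Decidable (Spec_generate_new_queries wordlist kwPos swSentence out) := by unfold Spec_generate_new_queries; infer_instance

-- ===== CLAIM (what is proved, stated in full; the proofs are below) =====
def Claim_equal_generate_new_queries : Prop := ∀ (wordlist : List (List String)) (kwPos : List Int) (swSentence : List String), Dom_generate_new_queries wordlist kwPos swSentence → Pre_generate_new_queries wordlist kwPos swSentence → Spec_generate_new_queries wordlist kwPos swSentence (generate_new_queries wordlist kwPos swSentence)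

-- ===== LEMMAS AND PROOFS =====

-- resolved write position of index p in a buffer of length n; out of range ↦ sentinel n
def resIdx (p : Int) (n : Nat) : Nat :=
  if 0 ≤ p ∧ p < n then p.toNat else if -(n : Int) ≤ p ∧ p < 0 then (p + n).toNat else n

theorem pySetD_char (s : List String) (p : Int) (w : String) :
    PySem.List.pySetD s p w = s.set (resIdx p s.length) w := by
  by_cases h1 : 0 ≤ p
  · by_cases h2 : p < (s.length : Int)
    · simp [PySem.List.pySetD, PySem.List.pySet?, PySem.List.pyIdx?, resIdx, h1, h2]
    · simp only [PySem.List.pySetD, PySem.List.pySet?, PySem.List.pyIdx?, resIdx, h1, h2,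
        if_true, if_false, and_false, Option.map, Option.getD]
      rw [if_neg (by omega)]
      exact (List.set_eq_of_length_le (le_refl _)).symm
  · by_cases h2 : -(s.length : Int) ≤ p
    · simp only [PySem.List.pySetD, PySem.List.pySet?, PySem.List.pyIdx?, resIdx]
      rw [if_neg h1, if_pos h2, if_neg (by omega), if_pos (by omega)]
      simp only [Option.map_some, Option.getD_some]
      rw [show s.length - (-p).toNat = (p + s.length).toNat by omega]
    · simp only [PySem.List.pySetD, PySem.List.pySet?, PySem.List.pyIdx?, resIdx]
      rw [if_neg h1, if_neg h2, if_neg (by omega), if_neg (by omega)]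
      simp only [Option.map_none, Option.getD_none]
      exact (List.set_eq_of_length_le (le_refl _)).symm

theorem getElem?_pySetD_ne (s : List String) (p : Int) (w : String) (j : Nat)
    (h : resIdx p s.length ≠ j) : (PySem.List.pySetD s p w)[j]? = s[j]? := by
  rw [pySetD_char]
  exact List.getElem?_set_ne (by omega)

theorem getElem?_pySetD_eq (s : List String) (p : Int) (w : String) (j : Nat)
    (h : resIdx p s.length = j) (hj : j < s.length) :
    (PySem.List.pySetD s p w)[j]? = some w := by
  rw [pySetD_char, h]
  simp [hj]

theorem length_fillLoop (kwPos : List Int) (ws : List String) (i : Nat) (buf : List String) :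
    (fillLoop kwPos ws i buf).length = buf.length := by
  induction ws generalizing i buf with
  | nil => rfl
  | cons w ws ih =>
      simp [fillLoop, ih, PySem.List.length_pySetD]

-- position j is written by the loop starting at index i over m words, buffer length n
def wr (kwPos : List Int) (n i m j : Nat) : Prop :=
  ∃ k < m, resIdx (PySem.List.pyGetD kwPos ((i + k : Nat) : Int) 0) n = j

theorem fillLoop_unwritten (kwPos : List Int) (ws : List String) (i : Nat) (buf : List String)
    (j : Nat) (h : ¬ wr kwPos buf.length i ws.length j) :
    (fillLoop kwPos ws i buf)[j]? = buf[j]? := by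
  induction ws generalizing i buf with
  | nil => rfl
  | cons w ws ih =>
      have h0 : resIdx (PySem.List.pyGetD kwPos ((i : Nat) : Int) 0) buf.length ≠ j := by
        intro hc; exact h ⟨0, by simp, by simpa using hc⟩
      have htail : ¬ wr kwPos (PySem.List.pySetD buf (PySem.List.pyGetD kwPos ((i : Nat) : Int) 0) w).length (i + 1) ws.length j := by
        rw [PySem.List.length_pySetD]
        rintro ⟨k, hk, hres⟩
        refine h ⟨k + 1, by simp only [List.length_cons]; omega, ?_⟩
        rw [show i + (k + 1) = i + 1 + k by omega]; exact hres
      rw [fillLoop, ih _ _ htail, getElem?_pySetD_ne _ _ _ _ h0]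

theorem fillLoop_agree (kwPos : List Int) (ws : List String) (i : Nat) (s s' : List String)
    (hlen : s.length = s'.length)
    (hag : ∀ j : Nat, ¬ wr kwPos s.length i ws.length j → s[j]? = s'[j]?) :
    fillLoop kwPos ws i s = fillLoop kwPos ws i s' := by
  induction ws generalizing i s s' with
  | nil =>
      apply List.ext_getElem?
      intro j
      exact hag j (by rintro ⟨k, hk, _⟩; simp at hk)
  | cons w ws ih =>
      rw [fillLoop, fillLoop]
      set p := PySem.List.pyGetD kwPos ((i : Nat) : Int) 0 with hp
      apply ih
      · simp [PySem.List.length_pySetD, hlen]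
      · intro j hj
        rw [PySem.List.length_pySetD] at hj
        by_cases hr : resIdx p s.length = j
        · by_cases hjl : j < s.length
          · rw [getElem?_pySetD_eq _ _ _ _ hr hjl,
              getElem?_pySetD_eq _ _ _ _ (by rw [← hlen]; exact hr) (by omega)]
          · have e1 : (PySem.List.pySetD s p w)[j]? = none :=
              List.getElem?_eq_none (by rw [PySem.List.length_pySetD]; omega)
            have e2 : (PySem.List.pySetD s' p w)[j]? = none :=
              List.getElem?_eq_none (by rw [PySem.List.length_pySetD]; omega)
            rw [e1, e2]
        · have hr' : resIdx p s'.length ≠ j := by rw [← hlen]; exact hr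
          rw [getElem?_pySetD_ne _ _ _ _ hr, getElem?_pySetD_ne _ _ _ _ hr']
          apply hag
          rintro ⟨k, hk, hres⟩
          rcases k with _ | k
          · refine hr ?_
            rw [Nat.add_zero] at hres
            rw [← hp] at hres
            exact hres
          · refine hj ⟨k, by simp only [List.length_cons] at hk; omega, ?_⟩
            rw [show i + 1 + k = i + (k + 1) by omega]; exact hres

theorem fillLoop_absorb (kwPos : List Int) (c c' : List String) (s : List String)
    (hlen : c.length = c'.length) :
    fillLoop kwPos c 0 (fillLoop kwPos c' 0 s) = fillLoop kwPos c 0 s := by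
  apply fillLoop_agree
  · rw [length_fillLoop]
  · intro j hj
    rw [length_fillLoop] at hj
    exact fillLoop_unwritten _ _ _ _ _ (by rw [← hlen]; exact hj)

theorem foldA_eq_map (kwPos : List Int) (s0 : List String) (m : Nat) :
    ∀ (combs : List (List String)) (acc buf : List String),
      (∀ c ∈ combs, c.length = m) →
      (∀ c : List String, c.length = m → fillLoop kwPos c 0 buf = fillLoop kwPos c 0 s0) →
      ((combs.foldl
          (fun (st : List String × List String) comb =>
            let b := fillLoop kwPos comb 0 st.2
            (st.1 ++ [PySem.Str.join " " b], b))
          (acc, buf)).1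
        = acc ++ combs.map (fun c => PySem.Str.join " " (fillLoop kwPos c 0 s0))) := by
  intro combs
  induction combs with
  | nil => intro acc buf _ _; simp
  | cons c combs ih =>
      intro acc buf hm hbuf
      have hc : c.length = m := hm c (by simp)
      have hb : fillLoop kwPos c 0 buf = fillLoop kwPos c 0 s0 := hbuf c hc
      rw [List.foldl_cons]
      simp only []
      rw [hb, ih _ _ (fun c' hc' => hm c' (by simp [hc']))
        (fun c' hc' => fillLoop_absorb kwPos c' c s0 (by omega))]
      simp

theorem mem_pyProduct_length (wl : List (List String)) (c : List String)
    (h : c ∈ pyProduct wl) : c.length = wl.length := by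
  induction wl generalizing c with
  | nil => simp [pyProduct] at h; simp [h]
  | cons l ls ih =>
      simp only [pyProduct, List.mem_flatMap, List.mem_map] at h
      obtain ⟨w, _, c', hc', rfl⟩ := h
      simp [ih c' hc']

theorem pyProduct_of_mem_nil (wl : List (List String)) (h : ∃ l ∈ wl, l = []) :
    pyProduct wl = [] := by
  induction wl with
  | nil => simp at h
  | cons l ls ih =>
      rcases h with ⟨l', hl', he⟩
      rcases List.mem_cons.1 hl' with rfl | hmem
      · simp [pyProduct, he]
      · simp [pyProduct, ih ⟨l', hmem, he⟩]

theorem altRec_eq_map (kwPos : List Int) :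
    ∀ (rest : List (List String)) (d : Nat) (buf : List String),
      altRec kwPos rest d buf
        = (pyProduct rest).map (fun c => PySem.Str.join " " (fillLoop kwPos c d buf)) := by
  intro rest
  induction rest with
  | nil => intro d buf; simp [altRec, pyProduct, fillLoop]
  | cons l ls ih =>
      intro d buf
      simp only [altRec, pyProduct, List.map_flatMap, List.map_map]
      refine congrArg (l.flatMap ·) (funext fun w => ?_)
      rw [ih]
      rfl

-- ===== VERDICT (by name: the statement is the Claim_ definition above) =====
theorem generate_new_queries_spec : Claim_equal_generate_new_queries := by
  intro wl kw s _ _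
  unfold Spec_generate_new_queries generate_new_queries generate_new_queries_alt
  by_cases hemp : ∃ l ∈ wl, l = []
  · have hg : wl.any (fun ws => ws.isEmpty) = true := by
      rcases hemp with ⟨l, hl, rfl⟩
      exact List.any_eq_true.2 ⟨[], hl, rfl⟩
    rw [pyProduct_of_mem_nil wl hemp]
    simp [hg]
  · have hg : wl.any (fun ws => ws.isEmpty) = false := by
      rw [List.any_eq_false]
      intro l hl
      simp only [List.isEmpty_iff]
      exact fun he => hemp ⟨l, hl, he⟩
    rw [hg]
    simp only [Bool.false_eq_true, if_false]
    rw [altRec_eq_map]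
    rw [foldA_eq_map kw s wl.length (pyProduct wl) [] s
        (fun c hc => mem_pyProduct_length wl c hc) (fun _ _ => rfl)]
    simp
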